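-- pv_equiv track=rewrite | github.com/W-Thurston/Google-Foobar | numbers_station_coded_messages.py | answer
-- ===== SOURCE A (Python) =====
-- def answer(l,t):
-- 	######
-- 	# The function calulates sums for all sub strings in given list l
-- 	# 	Then tests to see if that sum is equal to integer t
-- 	#
-- 	# Returns:
-- 	# 		The smallest sum of index range:
-- 	# 			ex:	l = [4, 3, 5, 7, 8]
-- 	# 				t = 12
-- 	# 				sum([4,3,5]) = 12  -> index([0,2]) -> sum = 2
-- 	# 				sum([5,7]) = 12    -> index([2,3]) -> sum = 5
-- 	#
-- 	# 				Returns [0,2]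
-- 	#
-- 	# 		If no substring found retrun [-1,-1]
-- 	######
--
--
--
-- 	found_flag  = False
-- 	all_solved  = []
-- 	all_index   = []
-- 	sum_indexes = []
--
-- 	# Loop through each substring of list l
-- 	# 	If found set found_flag to True & append indexes to holder list
-- 	for i in range(len(l)):
-- 		for j in range(1,len(l)-i+1):
-- 			sub = l[i:i+j]
-- 			if sum(sub) == t:
-- 				found_flag = True
-- 				# all_solved.append(sub)
-- 				all_index.append([i,i+j-1])
--
-- 	# Calculate sum of each set of indexes
-- 	for i in all_index:
-- 		sum_indexes.append(sum(i))
--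
-- 	# use minimum value's index of sum_indexes as index to find
-- 	#	 substring indexes
-- 	if found_flag:
-- 		return( all_index[sum_indexes.index(min(sum_indexes))] )
-- 	else:
--
-- 		return([-1,-1])
-- ===== SOURCE B (Python) =====
-- def answer(l, t):
--     # One pass over start indices with a running sum; keeps the best (start, end)
--     # online instead of collecting all matches and post-scanning for the minimum.
--     n = len(l)
--     best = None  # (s, e) with minimal s+e, earliest (s, e) on ties
--     for s in range(n):
--         acc = 0
--         for e in range(s, n):
--             acc += l[e]
--             if acc == t and (best is None or s + e < best[0] + best[1]):
--                 best = (s, e)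
--     return [-1, -1] if best is None else [best[0], best[1]]
-- ===== Notes on version B (the rewrite author's own statement) =====
-- stated objective: faster
-- what changed: B drops A's three-pass design (enumerate every slice l[i:i+j] and re-sum it, collect all matching index pairs, then min+index over the index-sums) in favour of a single nested loop with a running sum per start index that keeps the best (start,end) pair online with a strict-< update, so no candidate list, no slicing and no post-scan.
import Mathlib
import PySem

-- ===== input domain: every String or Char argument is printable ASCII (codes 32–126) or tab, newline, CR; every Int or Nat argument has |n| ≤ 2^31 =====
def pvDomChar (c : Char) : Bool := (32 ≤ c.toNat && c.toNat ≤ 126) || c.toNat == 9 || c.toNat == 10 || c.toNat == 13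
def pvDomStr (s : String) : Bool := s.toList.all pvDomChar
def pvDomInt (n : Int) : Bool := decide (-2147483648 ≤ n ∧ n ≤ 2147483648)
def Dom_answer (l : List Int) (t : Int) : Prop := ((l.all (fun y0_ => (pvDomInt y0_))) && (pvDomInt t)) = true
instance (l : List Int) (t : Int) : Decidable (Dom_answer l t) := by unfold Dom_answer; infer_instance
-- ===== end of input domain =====

-- B replaces A's collect-all-matches-then-argmin (slice+sum for every index pair, then a
-- min/index post-scan) by a single pass over start indices with a running sum that keeps
-- the best index pair online; objective: faster.

-- ===== PORT A =====
def answer (l : List Int) (t : Int) : List Int :=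
  let st := (PySem.List.pyRange 0 (l.length : Int) 1).foldl
    (fun (st : Bool × List (List Int)) i =>
      (PySem.List.pyRange 1 ((l.length : Int) - i + 1) 1).foldl
        (fun st j =>
          let sub := PySem.List.slice l (some i) (some (i + j))
          if sub.sum = t then (true, st.2 ++ [[i, i + j - 1]]) else st)
        st)
    (false, [])
  let sums := st.2.foldl (fun acc p => acc ++ [p.sum]) []
  if st.1 then
    match PySem.List.min? sums (fun x => x) with
    | some m =>
      match PySem.List.index? sums m with
      | some k => (PySem.List.pyGet? st.2 (k : Int)).getD [-1, -1]
      | none => [-1, -1]   -- unreachable: the minimum is a member of sums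
    | none => [-1, -1]     -- unreachable: found_flag implies sums ≠ []
  else [-1, -1]

-- ===== PORT B =====
def answer_alt (l : List Int) (t : Int) : List Int :=
  let best := (PySem.List.pyRange 0 (l.length : Int) 1).foldl
    (fun (best : Option (Int × Int)) s =>
      ((PySem.List.pyRange s (l.length : Int) 1).foldl
        (fun (st : Option (Int × Int) × Int) e =>
          let acc := st.2 + PySem.List.pyGetD l e 0
          if acc = t then
            match st.1 with
            | none => (some (s, e), acc)
            | some b => if s + e < b.1 + b.2 then (some (s, e), acc) else (st.1, acc)
          else (st.1, acc))
        (best, 0)).1)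
    (none : Option (Int × Int))
  match best with
  | none => [-1, -1]
  | some b => [b.1, b.2]

-- ===== PRECONDITION & SPEC =====
def Spec_answer (l : List Int) (t : Int) (out : List Int) : Prop := out = answer_alt l t
instance (l : List Int) (t : Int) (out : List Int) : Decidable (Spec_answer l t out) := by unfold Spec_answer; infer_instance

-- ===== CLAIM (what is proved, stated in full; the proofs are below) =====
def Claim_equal_answer : Prop := ∀ (l : List Int) (t : Int), Dom_answer l t → Spec_answer l t (answer l t)

-- ===== LEMMAS AND PROOFS =====

/-- `[p.1, p.2]`, the index pair as the 2-element list A stores. -/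
def pvToL (p : Int × Int) : List Int := [p.1, p.2]

/-- The index-sum key both programs minimise. -/
def pvF (p : Int × Int) : Int := p.1 + p.2

/-- B's online update of the best candidate (strict `<`, so the earliest minimum is kept). -/
def pvUpd (b : Option (Int × Int)) (c : Int × Int) : Option (Int × Int) :=
  match b with
  | none => some c
  | some b0 => if c.1 + c.2 < b0.1 + b0.2 then some c else some b0

/-- First element with minimal key among `c :: H`. -/
def pvFirstMin (c : Int × Int) (H : List (Int × Int)) : Int × Int :=
  H.foldl (fun b x => if x.1 + x.2 < b.1 + b.2 then x else b) c

/-- The hits with start `s` among lengths `1..m`, in order. -/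
def pvRowM (l : List Int) (t : Int) (s m : Nat) : List (Int × Int) :=
  ((List.range m).filter (fun k => decide (((l.drop s).take (k + 1)).sum = t))).map
    (fun k : Nat => ((s : Int), (s : Int) + (k : Int)))

def pvRow (l : List Int) (t : Int) (s : Nat) : List (Int × Int) :=
  pvRowM l t s (l.length - s)

/-- All hits `(start, end)` in the enumeration order shared by both programs. -/
def pvHits (l : List Int) (t : Int) : List (Int × Int) :=
  (List.range l.length).flatMap (pvRow l t)

lemma pv_foldl_flag_append {α β : Type} (p : α → Prop) [DecidablePred p] (v : α → β) :
    ∀ (L : List α) (b : Bool) (acc : List β),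
    L.foldl (fun st x => if p x then (true, st.2 ++ [v x]) else st) (b, acc)
      = (b || L.any (fun x => decide (p x)), acc ++ (L.filter (fun x => decide (p x))).map v) := by
  intro L
  induction L with
  | nil => intro b acc; simp
  | cons x xs ih =>
    intro b acc
    by_cases hx : p x <;> simp [hx, ih]

lemma pv_foldl_outer {α β : Type} (step : (Bool × List β) → α → (Bool × List β))
    (bfn : α → Bool) (r : α → List β) :
    ∀ (L : List α), (∀ st x, x ∈ L → step st x = (st.1 || bfn x, st.2 ++ r x)) →
      ∀ (b : Bool) (acc : List β),
      L.foldl step (b, acc) = (b || L.any bfn, acc ++ L.flatMap r) := by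
  intro L
  induction L with
  | nil => intro _ b acc; simp
  | cons x xs ih =>
    intro h b acc
    rw [List.foldl_cons, h _ x (by simp)]
    rw [ih (fun st y hy => h st y (List.mem_cons_of_mem _ hy)) _ _]
    simp [Bool.or_assoc]

lemma pv_foldl_flatMap {α β γ : Type} (g : γ → β → γ) (r : α → List β) (step : γ → α → γ) :
    ∀ (L : List α), (∀ b x, x ∈ L → step b x = (r x).foldl g b) → ∀ (init : γ),
    L.foldl step init = (L.flatMap r).foldl g init := by
  intro L
  induction L with
  | nil => intro _ init; simp
  | cons x xs ih =>
    intro h init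
    rw [List.foldl_cons, h _ x (by simp), List.flatMap_cons, List.foldl_append]
    exact ih (fun b y hy => h b y (List.mem_cons_of_mem _ hy)) _

lemma pv_any_flatMap {α β : Type} (r : α → List β) :
    ∀ L : List α, L.any (fun x => !(r x).isEmpty) = !(L.flatMap r).isEmpty := by
  intro L
  induction L with
  | nil => simp
  | cons x xs ih =>
    cases h : (r x).isEmpty with
    | true =>
      have hx : r x = [] := by simpa [List.isEmpty_iff] using h
      simp [hx, ih]
    | false =>
      have hx : r x ≠ [] := by simpa [List.isEmpty_iff] using h
      simp [List.any_cons, h, List.flatMap_cons, hx]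

lemma pv_foldl_upd_some :
    ∀ (H : List (Int × Int)) (b : Int × Int), H.foldl pvUpd (some b) = some (pvFirstMin b H) := by
  intro H
  induction H with
  | nil => intro b; simp [pvFirstMin]
  | cons x xs ih =>
    intro b
    by_cases h : x.1 + x.2 < b.1 + b.2 <;>
      simp only [List.foldl_cons, pvUpd, h, if_pos, if_neg, not_false_iff, ih, pvFirstMin]

lemma pv_sel :
    ∀ (H : List (Int × Int)) (c : Int × Int),
    ∃ k : Nat, PySem.List.index? (pvF c :: H.map pvF) ((H.map pvF).foldl min (pvF c)) = some k ∧
      (c :: H)[k]? = some (pvFirstMin c H) := by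
  intro H
  induction H with
  | nil =>
    intro c
    exact ⟨0, by simp, by simp [pvFirstMin]⟩
  | cons x xs ih =>
    intro c
    have hfold : ((x :: xs).map pvF).foldl min (pvF c)
        = (xs.map pvF).foldl min (min (pvF c) (pvF x)) := by
      simp [List.foldl_cons]
    by_cases hx : pvF x < pvF c
    · obtain ⟨k, hidx, hget⟩ := ih x
      have hminr : min (pvF c) (pvF x) = pvF x := min_eq_right (le_of_lt hx)
      have hle : (xs.map pvF).foldl min (pvF x) ≤ pvF x :=
        (PySem.List.foldl_min_le (xs.map pvF) (pvF x)).1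
      have hne : pvF c ≠ (xs.map pvF).foldl min (pvF x) := by omega
      refine ⟨k + 1, ?_, ?_⟩
      · rw [hfold, hminr, PySem.List.index?_cons_of_ne _ hne]
        simp only [List.map_cons] at hidx ⊢
        rw [hidx]
        rfl
      · have hfm : pvFirstMin c (x :: xs) = pvFirstMin x xs := by
          simp only [pvFirstMin, List.foldl_cons]
          rw [if_pos (show x.1 + x.2 < c.1 + c.2 by simpa [pvF] using hx)]
        rw [List.getElem?_cons_succ, hget, hfm]
    · obtain ⟨k, hidx, hget⟩ := ih c
      have hminl : min (pvF c) (pvF x) = pvF c := min_eq_left (not_lt.mp hx)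
      have hle : (xs.map pvF).foldl min (pvF c) ≤ pvF c :=
        (PySem.List.foldl_min_le (xs.map pvF) (pvF c)).1
      have hfm : pvFirstMin c (x :: xs) = pvFirstMin c xs := by
        simp only [pvFirstMin, List.foldl_cons]
        rw [if_neg (show ¬ x.1 + x.2 < c.1 + c.2 by simpa [pvF] using hx)]
      by_cases hm : (xs.map pvF).foldl min (pvF c) = pvF c
      · have hk0 : k = 0 := by
          rw [hm, PySem.List.index?_cons_self] at hidx
          exact (Option.some_injective _ hidx.symm)
        have hc0 : pvFirstMin c xs = c := by
          rw [hk0] at hget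
          simpa using hget.symm
        refine ⟨0, ?_, ?_⟩
        · rw [hfold, hminl, hm, PySem.List.index?_cons_self]
        · simp [hfm, hc0]
      · have hlt : (xs.map pvF).foldl min (pvF c) < pvF c := lt_of_le_of_ne hle hm
        have hnec : pvF c ≠ (xs.map pvF).foldl min (pvF c) := by omega
        have hnex : pvF x ≠ (xs.map pvF).foldl min (pvF c) := by omega
        rw [PySem.List.index?_cons_of_ne _ hnec] at hidx
        obtain ⟨k', hk', hkk⟩ := Option.map_eq_some_iff.mp hidx
        refine ⟨k' + 1 + 1, ?_, ?_⟩
        · rw [hfold, hminl, PySem.List.index?_cons_of_ne _ hnec]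
          simp only [List.map_cons]
          rw [PySem.List.index?_cons_of_ne _ hnex, hk']
          rfl
        · have : (c :: xs)[k' + 1]? = some (pvFirstMin c xs) := by
            rw [← hkk] at hget; exact hget
          rw [List.getElem?_cons_succ, List.getElem?_cons_succ, hfm]
          simpa using this

lemma pv_any_filter {α : Type} (p : α → Bool) :
    ∀ L : List α, L.any p = !(L.filter p).isEmpty := by
  intro L
  induction L with
  | nil => simp
  | cons x xs ih => cases hx : p x <;> simp [hx, ih]

lemma pv_A_inner (l : List Int) (t : Int) (s : Nat) (hs : s < l.length)
    (st : Bool × List (List Int)) :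
    (PySem.List.pyRange 1 ((l.length : Int) - (s : Int) + 1) 1).foldl
      (fun st j =>
        if (PySem.List.slice l (some (s : Int)) (some ((s : Int) + j))).sum = t
        then (true, st.2 ++ [[(s : Int), (s : Int) + j - 1]]) else st) st
    = (st.1 || !(pvRow l t s).isEmpty, st.2 ++ (pvRow l t s).map pvToL) := by
  obtain ⟨b, acc⟩ := st
  rw [PySem.List.pyRange_one]
  have h1 : ((l.length : Int) - (s : Int) + 1 - 1).toNat = l.length - s := by omega
  rw [h1]
  simp only [List.foldl_map]
  rw [pv_foldl_flag_append
      (fun k : Nat => (PySem.List.slice l (some (s : Int)) (some ((s : Int) + (1 + (k : Int))))).sum = t)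
      (fun k : Nat => [(s : Int), (s : Int) + (1 + (k : Int)) - 1]) _ b acc]
  have hcond : ∀ k ∈ List.range (l.length - s),
      (decide ((PySem.List.slice l (some (s : Int)) (some ((s : Int) + (1 + (k : Int))))).sum = t))
        = (decide (((l.drop s).take (k + 1)).sum = t)) := by
    intro k _
    have hcast : (s : Int) + (1 + (k : Int)) = ((s + (k + 1) : Nat) : Int) := by push_cast; ring
    rw [hcast, PySem.List.slice_natCast, show s + (k + 1) - s = k + 1 by omega]
  have hfilter : (List.range (l.length - s)).filter
        (fun k : Nat => decide ((PySem.List.slice l (some (s : Int)) (some ((s : Int) + (1 + (k : Int))))).sum = t))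
      = (List.range (l.length - s)).filter (fun k : Nat => decide (((l.drop s).take (k + 1)).sum = t)) :=
    List.filter_congr hcond
  have hflag : (List.range (l.length - s)).any
        (fun k : Nat => decide ((PySem.List.slice l (some (s : Int)) (some ((s : Int) + (1 + (k : Int))))).sum = t))
      = !(pvRow l t s).isEmpty := by
    rw [pv_any_filter, hfilter]
    simp only [pvRow, pvRowM, List.isEmpty_map]
  have hlist : ((List.range (l.length - s)).filter
        (fun k : Nat => decide ((PySem.List.slice l (some (s : Int)) (some ((s : Int) + (1 + (k : Int))))).sum = t))).map
          (fun k : Nat => [(s : Int), (s : Int) + (1 + (k : Int)) - 1])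
      = (pvRow l t s).map pvToL := by
    rw [hfilter]
    simp only [pvRow, pvRowM, List.map_map]
    refine List.map_congr_left ?_
    intro k _
    simp only [Function.comp, pvToL]
    have : (s : Int) + (1 + (k : Int)) - 1 = (s : Int) + (k : Int) := by ring
    rw [this]
  rw [hflag, hlist]

lemma pv_B_inner (l : List Int) (t : Int) (s : Nat) :
    ∀ (m : Nat), s + m ≤ l.length → ∀ (best : Option (Int × Int)),
    (List.range m).foldl
      (fun (st : Option (Int × Int) × Int) (k : Nat) =>
        if st.2 + PySem.List.pyGetD l ((s : Int) + (k : Int)) 0 = t then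
          match st.1 with
          | none => (some ((s : Int), (s : Int) + (k : Int)), st.2 + PySem.List.pyGetD l ((s : Int) + (k : Int)) 0)
          | some b =>
            if (s : Int) + ((s : Int) + (k : Int)) < b.1 + b.2 then
              (some ((s : Int), (s : Int) + (k : Int)), st.2 + PySem.List.pyGetD l ((s : Int) + (k : Int)) 0)
            else (st.1, st.2 + PySem.List.pyGetD l ((s : Int) + (k : Int)) 0)
        else (st.1, st.2 + PySem.List.pyGetD l ((s : Int) + (k : Int)) 0))
      (best, 0)
    = ((pvRowM l t s m).foldl pvUpd best, ((l.drop s).take m).sum) := by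
  intro m
  induction m with
  | zero => intro _ best; simp [pvRowM]
  | succ m ih =>
    intro hm best
    rw [List.range_succ, List.foldl_append, ih (by omega)]
    have hsm : s + m < l.length := by omega
    have hmd : m < (l.drop s).length := by simp; omega
    have hget : PySem.List.pyGetD l ((s : Int) + (m : Int)) 0 = l[s + m] := by
      have hc : (s : Int) + (m : Int) = ((s + m : Nat) : Int) := by push_cast; ring
      rw [hc, PySem.List.pyGetD_natCast]
      exact List.getD_eq_getElem l 0 hsm
    have htake : ((l.drop s).take (m + 1)).sum = ((l.drop s).take m).sum + l[s + m] := by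
      rw [List.take_add_one, List.getElem?_eq_getElem hmd]
      simp [List.getElem_drop]
    have hrow : pvRowM l t s (m + 1)
        = pvRowM l t s m ++ (if ((l.drop s).take (m + 1)).sum = t
            then [((s : Int), (s : Int) + (m : Int))] else []) := by
      simp only [pvRowM, List.range_succ, List.filter_append, List.map_append]
      by_cases h : ((l.drop s).take (m + 1)).sum = t <;> simp [h]
    rw [hrow, List.foldl_append]
    simp only [List.foldl_cons, List.foldl_nil, hget]
    by_cases hc : ((l.drop s).take m).sum + l[s + m] = t
    · have hc' : ((l.drop s).take (m + 1)).sum = t := by rw [htake]; exact hc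
      simp only [hc, if_pos, hc', List.foldl_cons, List.foldl_nil]
      cases hb : (pvRowM l t s m).foldl pvUpd best with
      | none => simp [pvUpd]
      | some b0 => by_cases hlt : (s : Int) + ((s : Int) + (m : Int)) < b0.1 + b0.2 <;>
          simp [pvUpd, hlt]
    · have hc' : ¬ ((l.drop s).take (m + 1)).sum = t := by rw [htake]; exact hc
      simp [hc, htake]

lemma pv_outer_range (n : Nat) :
    PySem.List.pyRange 0 (n : Int) 1 = (List.range n).map (fun s : Nat => (s : Int)) := by
  rw [PySem.List.pyRange_one]
  simp

lemma pv_A_eq (l : List Int) (t : Int) :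
    answer l t = match pvHits l t with
      | [] => [-1, -1]
      | c :: H => [(pvFirstMin c H).1, (pvFirstMin c H).2] := by
  have hh : pvHits l t = (List.range l.length).flatMap (pvRow l t) := rfl
  simp only [answer]
  rw [pv_outer_range]
  simp only [List.foldl_map]
  rw [pv_foldl_outer _ (fun s : Nat => !(pvRow l t s).isEmpty)
      (fun s : Nat => (pvRow l t s).map pvToL) (List.range l.length)
      (fun st s hs => pv_A_inner l t s (List.mem_range.mp hs) st) false []]
  simp only [Bool.false_or, List.nil_append]
  rw [← List.map_flatMap, ← hh, pv_any_flatMap (pvRow l t) (List.range l.length), ← hh]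
  rw [PySem.List.foldl_append_singleton_eq_map]
  simp only [List.nil_append, List.map_map]
  have hsum : ((fun p : List Int => p.sum) ∘ pvToL) = pvF := by
    funext p; simp [pvToL, pvF]
  rw [hsum]
  cases hH : pvHits l t with
  | nil => simp
  | cons c H =>
    simp only [List.isEmpty_cons, Bool.not_false, if_true, List.map_cons]
    rw [PySem.List.min?_id_cons]
    obtain ⟨k, hidx, hget⟩ := pv_sel H c
    simp only [hidx, PySem.List.pyGet?_natCast]
    rw [show pvToL c :: List.map pvToL H = List.map pvToL (c :: H) from rfl,
      List.getElem?_map, hget]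
    simp [pvToL]

lemma pv_B_eq (l : List Int) (t : Int) :
    answer_alt l t = match (pvHits l t).foldl pvUpd none with
      | none => [-1, -1]
      | some b => [b.1, b.2] := by
  have hh : pvHits l t = (List.range l.length).flatMap (pvRow l t) := rfl
  simp only [answer_alt]
  rw [pv_outer_range]
  simp only [List.foldl_map]
  rw [pv_foldl_flatMap pvUpd (pvRow l t) _ (List.range l.length) ?_ none]
  · rw [← hh]
  · intro b s hs
    have hs' : s < l.length := List.mem_range.mp hs
    have hin : PySem.List.pyRange ((s : Nat) : Int) (l.length : Int) 1
        = (List.range (l.length - s)).map (fun k : Nat => (s : Int) + (k : Int)) := by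
      rw [PySem.List.pyRange_one]
      rw [show ((l.length : Int) - (s : Int)).toNat = l.length - s by omega]
    rw [hin]
    simp only [List.foldl_map]
    rw [pv_B_inner l t s (l.length - s) (by omega) b]
    rfl

lemma pv_main (l : List Int) (t : Int) : answer l t = answer_alt l t := by
  rw [pv_A_eq, pv_B_eq]
  cases hH : pvHits l t with
  | nil => rfl
  | cons c H =>
    have h1 : (c :: H).foldl pvUpd none = some (pvFirstMin c H) := by
      rw [List.foldl_cons, show pvUpd none c = some c from rfl, pv_foldl_upd_some]
    rw [h1]

-- ===== VERDICT (by name: the statement is the Claim_ definition above) =====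
theorem answer_spec : Claim_equal_answer := by
  intro l t _
  exact pv_main l t
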